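-- pv_equiv track=rewrite | github.com/wkd-woo/kakao_programmers | 2018 카카오 블라인드 채용/파일명 정렬.py | solution
-- ===== SOURCE A (Python) =====
-- def solution(files):
--     answer = []
--     for file in files:
--         head, number, tail = [], [], []
--         for i, w in enumerate(file):
--             if w.isdigit():
--                 if not number:
--                     head = file[:i]
--                 number.append(w)
--             elif (number and not w.isdigit()) or len(number) == 5:
--                 tail = file[i:]
--                 break
--         number, tail = ''.join(number), ''.join(tail)
--         answer.append([head, number, tail])
--
--     answer.sort(key=lambda x: (x[0].upper(), int(x[1])))
--     answer = [''.join(each) for each in answer]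
--     return answer
-- ===== SOURCE B (Python) =====
-- def solution(files):
--     def key(f):
--         i = 0
--         while not f[i].isdigit():
--             i += 1
--         j = i
--         while j < len(f) and f[j].isdigit():
--             j += 1
--         return (f[:i].upper(), int(f[i:j]))
--     return sorted(files, key=key)
-- ===== Notes on version B (the rewrite author's own statement) =====
-- stated objective: simpler
-- what changed: B sorts the filenames directly with a key function (two index scans producing (head.upper(), int(number))) instead of building [head, number, tail] triples with an enumerate/break loop, sorting the triples and re-joining them.
import Mathlib
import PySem

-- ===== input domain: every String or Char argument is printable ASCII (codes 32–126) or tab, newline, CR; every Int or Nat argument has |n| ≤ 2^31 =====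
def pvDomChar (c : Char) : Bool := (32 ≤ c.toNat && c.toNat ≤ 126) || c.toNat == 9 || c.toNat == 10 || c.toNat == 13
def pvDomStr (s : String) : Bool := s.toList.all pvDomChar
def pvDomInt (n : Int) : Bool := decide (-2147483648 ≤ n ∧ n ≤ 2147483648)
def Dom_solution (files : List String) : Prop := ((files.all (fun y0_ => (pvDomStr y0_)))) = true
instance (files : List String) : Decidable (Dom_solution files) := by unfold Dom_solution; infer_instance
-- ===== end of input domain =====

-- B sorts the filenames directly with a head/number sort key computed by two index
-- scans, instead of building [head, number, tail] triples, sorting them and re-joining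
-- (simpler; return value only, A mutates no argument observably).

-- ===== PORT A =====
-- the inner 'for i, w in enumerate(file)' loop with its break, carrying head/number state
def pvLoopA (full : List Char) : List Char → Nat → List Char → List Char → List Char × List Char × List Char
  | [], _, head, number => (head, number, [])
  | c :: rest, i, head, number =>
    if PySem.Chars.isdigit c then
      pvLoopA full rest (i + 1) (if number = [] then full.take i else head) (number ++ [c])
    else if number ≠ [] ∨ number.length = 5 then
      (head, number, full.drop i)
    else
      pvLoopA full rest (i + 1) head number

def solution (files : List String) : List String :=
  let answer := files.map (fun file => pvLoopA file.toList file.toList 0 [] [])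
  -- answer.sort(key=lambda x: (x[0].upper(), int(x[1]))); int of a nonempty digit run always parses (Pre_)
  let answer2 := PySem.List.sorted2 answer
    (fun x => PySem.Chars.upper x.1)
    (fun x => (PySem.Int.ofStr? (String.ofList x.2.1)).getD 0)
  answer2.map (fun each => String.ofList (each.1 ++ each.2.1 ++ each.2.2))

-- ===== PORT B =====
-- 'while not f[i].isdigit(): i += 1' (index of the first digit; Pre_ guarantees one exists)
def pvFirstDigit : List Char → Nat → Nat
  | [], i => i
  | c :: rest, i => if PySem.Chars.isdigit c then i else pvFirstDigit rest (i + 1)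

-- 'while j < len(f) and f[j].isdigit(): j += 1', scanning from position i
def pvDigitEnd : List Char → Nat → Nat
  | [], j => j
  | c :: rest, j => if PySem.Chars.isdigit c then pvDigitEnd rest (j + 1) else j

def solution_alt (files : List String) : List String :=
  PySem.List.sorted2 files
    (fun f => PySem.Chars.upper (f.toList.take (pvFirstDigit f.toList 0)))
    (fun f =>
      let cs := f.toList
      let i := pvFirstDigit cs 0
      let j := pvDigitEnd (cs.drop i) i
      (PySem.Int.ofStr? (String.ofList ((cs.drop i).take (j - i)))).getD 0)

-- ===== PRECONDITION & SPEC =====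
-- Pre_ excludes exactly the inputs on which A raises: a filename with no (ASCII) digit makes
-- A's sort key call .upper() on an empty list / int of an empty string and raise (B raises there too, an IndexError).
def Pre_solution (files : List String) : Prop :=
  ∀ f ∈ files, f.toList.any PySem.Chars.isdigit = true
instance (files : List String) : Decidable (Pre_solution files) := by unfold Pre_solution; infer_instance

def pvWitness_solution : List String := ["img12.png", "IMG10.PNG", "F-5 Freedom Fighter"]

def Spec_solution (files : List String) (out : List String) : Prop := out = solution_alt files
instance (files : List String) (out : List String) : Decidable (Spec_solution files out) := by unfold Spec_solution; infer_instance

-- ===== CLAIM (what is proved, stated in full; the proofs are below) =====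
def Claim_equal_solution : Prop := ∀ (files : List String), Dom_solution files → Pre_solution files → Spec_solution files (solution files)

-- ===== LEMMAS AND PROOFS =====

-- inserting a mapped element into a mapped list commutes with map when the comparator agrees
theorem insertBy_map {α β : Type} (f : α → β) (bb : β → β → Bool) (ba : α → α → Bool)
    (x : α) (ys : List α) (h : ∀ y ∈ ys, bb (f x) (f y) = ba x y) :
    PySem.List.insertBy bb (f x) (ys.map f) = (PySem.List.insertBy ba x ys).map f := by
  induction ys with
  | nil => rfl
  | cons y ys ih =>
    simp only [List.map_cons, PySem.List.insertBy]
    rw [h y (by simp)]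
    by_cases hb : ba x y = true
    · simp [hb]
    · simp only [Bool.not_eq_true] at hb
      simp [hb, ih (fun z hz => h z (by simp [hz]))]

-- the insertion-sort fold commutes with map when the comparator agrees on all involved elements
theorem foldl_insertBy_map {α β : Type} (f : α → β) (bb : β → β → Bool) (ba : α → α → Bool) :
    ∀ (xs acc : List α),
    (∀ x ∈ xs, ∀ y, (y ∈ acc ∨ y ∈ xs) → bb (f x) (f y) = ba x y) →
    List.foldl (fun a x => PySem.List.insertBy bb x a) (acc.map f) (xs.map f)
      = (List.foldl (fun a x => PySem.List.insertBy ba x a) acc xs).map f := by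
  intro xs
  induction xs with
  | nil => intro acc _; rfl
  | cons x xs ih =>
    intro acc H
    simp only [List.map_cons, List.foldl_cons]
    rw [insertBy_map f bb ba x acc (fun y hy => H x (by simp) y (Or.inl hy)), ih]
    intro z hz y hy
    refine H z (by simp [hz]) y ?_
    rcases hy with hy | hy
    · rcases (PySem.List.mem_insertBy ba x y acc).mp hy with rfl | hy
      · exact Or.inr (by simp)
      · exact Or.inl hy
    · exact Or.inr (by simp [hy])

-- phase 2 of A's loop: once 'number' is nonempty, the loop consumes the digit run and breaks
theorem pvLoopA_phase2 (full : List Char) :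
    ∀ (cs : List Char) (i : Nat) (head number : List Char), cs = full.drop i → number ≠ [] →
    pvLoopA full cs i head number
      = (head, number ++ cs.takeWhile PySem.Chars.isdigit,
         cs.dropWhile PySem.Chars.isdigit) := by
  intro cs
  induction cs with
  | nil => intro i head number _ _; simp [pvLoopA]
  | cons c rest ih =>
    intro i head number hdrop hne
    by_cases hd : PySem.Chars.isdigit c = true
    · have hrest : rest = full.drop (i + 1) := by
        have := congrArg (List.drop 1) hdrop
        simpa [List.drop_drop, Nat.add_comm] using this
      simp only [pvLoopA, hd, if_pos, List.takeWhile_cons, List.dropWhile_cons]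
      rw [if_neg hne, ih (i + 1) head (number ++ [c]) hrest (by simp)]
      simp
    · simp only [Bool.not_eq_true] at hd
      have hcond : number ≠ [] ∨ number.length = 5 := Or.inl hne
      have hdropfull : full.drop i = c :: rest := hdrop.symm
      simp [pvLoopA, hd, hcond, hdropfull]

-- phase 1 of A's loop: while 'number' is empty, leading non-digits are skipped;
-- the whole loop therefore computes (prefix, digit run, rest) when a digit exists
theorem pvLoopA_phase1 (full : List Char) :
    ∀ (cs : List Char) (i : Nat) (h0 : List Char), cs = full.drop i →
    cs.any PySem.Chars.isdigit = true →
    pvLoopA full cs i h0 []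
      = (full.take (i + (cs.takeWhile (fun c => !PySem.Chars.isdigit c)).length),
         (cs.dropWhile (fun c => !PySem.Chars.isdigit c)).takeWhile PySem.Chars.isdigit,
         (cs.dropWhile (fun c => !PySem.Chars.isdigit c)).dropWhile PySem.Chars.isdigit) := by
  intro cs
  induction cs with
  | nil => intro i h0 _ hany; simp at hany
  | cons c rest ih =>
    intro i h0 hdrop hany
    have hrest : rest = full.drop (i + 1) := by
      have := congrArg (List.drop 1) hdrop
      simpa [List.drop_drop, Nat.add_comm] using this
    by_cases hd : PySem.Chars.isdigit c = true
    · simp only [pvLoopA, hd, if_pos, List.nil_append]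
      rw [pvLoopA_phase2 full rest (i + 1) (full.take i) [c] hrest (by simp)]
      simp [hd]
    · simp only [Bool.not_eq_true] at hd
      have hany' : rest.any PySem.Chars.isdigit = true := by simpa [hd] using hany
      simp only [pvLoopA, hd]
      rw [if_neg (by simp), if_neg (by simp)]
      rw [ih (i + 1) h0 hrest hany']
      simp [hd, Nat.add_assoc, Nat.add_comm 1]

-- B's first scan finds the length of the non-digit prefix
theorem pvFirstDigit_spec : ∀ (cs : List Char) (i : Nat),
    pvFirstDigit cs i = i + (cs.takeWhile (fun c => !PySem.Chars.isdigit c)).length := by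
  intro cs
  induction cs with
  | nil => intro i; simp [pvFirstDigit]
  | cons c rest ih =>
    intro i
    by_cases hd : PySem.Chars.isdigit c = true
    · simp [pvFirstDigit, hd]
    · simp only [Bool.not_eq_true] at hd
      simp [pvFirstDigit, hd, ih, Nat.add_assoc, Nat.add_comm 1]

-- B's second scan finds the end of the digit run
theorem pvDigitEnd_spec : ∀ (cs : List Char) (j : Nat),
    pvDigitEnd cs j = j + (cs.takeWhile PySem.Chars.isdigit).length := by
  intro cs
  induction cs with
  | nil => intro j; simp [pvDigitEnd]
  | cons c rest ih =>
    intro j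
    by_cases hd : PySem.Chars.isdigit c = true
    · simp [pvDigitEnd, hd, ih, Nat.add_assoc, Nat.add_comm 1]
    · simp only [Bool.not_eq_true] at hd
      simp [pvDigitEnd, hd]

-- take/drop at the non-digit-prefix length recover takeWhile/dropWhile
theorem take_takeWhile_length (l : List Char) (p : Char → Bool) :
    l.take (l.takeWhile p).length = l.takeWhile p :=
  (List.prefix_iff_eq_take.mp (l.takeWhile_prefix p)).symm

theorem drop_takeWhile_length (l : List Char) (p : Char → Bool) :
    l.drop (l.takeWhile p).length = l.dropWhile p := by
  have hs := List.suffix_iff_eq_drop.mp (l.dropWhile_suffix p)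
  have hlen : (l.takeWhile p).length + (l.dropWhile p).length = l.length := by
    have h2 := congrArg List.length (l.takeWhile_append_dropWhile (p := p))
    rw [List.length_append] at h2
    exact h2
  rw [hs]
  congr 1
  omega

-- A's parse of a digit-containing filename, in closed form
def pvParse (f : String) : List Char × List Char × List Char :=
  (f.toList.takeWhile (fun c => !PySem.Chars.isdigit c),
   (f.toList.dropWhile (fun c => !PySem.Chars.isdigit c)).takeWhile PySem.Chars.isdigit,
   (f.toList.dropWhile (fun c => !PySem.Chars.isdigit c)).dropWhile PySem.Chars.isdigit)

theorem pvLoopA_eq_parse (f : String) (h : f.toList.any PySem.Chars.isdigit = true) :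
    pvLoopA f.toList f.toList 0 [] [] = pvParse f := by
  rw [pvLoopA_phase1 f.toList f.toList 0 [] (by simp) h]
  unfold pvParse
  rw [Nat.zero_add, take_takeWhile_length]

-- the three parsed pieces concatenate back to the filename
theorem pvParse_join (f : String) :
    (pvParse f).1 ++ (pvParse f).2.1 ++ (pvParse f).2.2 = f.toList := by
  unfold pvParse
  simp [List.takeWhile_append_dropWhile]

-- B's two sort-key components coincide with A's key on the parsed triple
theorem keyB1_eq (f : String) :
    PySem.Chars.upper (f.toList.take (pvFirstDigit f.toList 0)) = PySem.Chars.upper (pvParse f).1 := by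
  rw [pvFirstDigit_spec, Nat.zero_add]
  unfold pvParse
  rw [take_takeWhile_length]

theorem keyB2_eq (f : String) :
    (PySem.Int.ofStr? (String.ofList ((f.toList.drop (pvFirstDigit f.toList 0)).take
        (pvDigitEnd (f.toList.drop (pvFirstDigit f.toList 0)) (pvFirstDigit f.toList 0)
          - pvFirstDigit f.toList 0)))).getD 0
    = (PySem.Int.ofStr? (String.ofList (pvParse f).2.1)).getD 0 := by
  have hi : pvFirstDigit f.toList 0 = (f.toList.takeWhile (fun c => !PySem.Chars.isdigit c)).length := by
    rw [pvFirstDigit_spec, Nat.zero_add]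
  have hdropi : f.toList.drop (pvFirstDigit f.toList 0)
      = f.toList.dropWhile (fun c => !PySem.Chars.isdigit c) := by
    rw [hi, drop_takeWhile_length]
  rw [hdropi, pvDigitEnd_spec]
  unfold pvParse
  rw [Nat.add_sub_cancel_left, take_takeWhile_length]

-- the two stable sorts agree: sorting the parsed triples by A's key is sorting the
-- filenames by B's key, then parsing
theorem sorted2_map_pvParse (files : List String) :
    PySem.List.sorted2 (files.map pvParse)
      (fun x => PySem.Chars.upper x.1)
      (fun x => (PySem.Int.ofStr? (String.ofList x.2.1)).getD 0)
    = (PySem.List.sorted2 files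
        (fun f => PySem.Chars.upper (f.toList.take (pvFirstDigit f.toList 0)))
        (fun f =>
          let cs := f.toList
          let i := pvFirstDigit cs 0
          let j := pvDigitEnd (cs.drop i) i
          (PySem.Int.ofStr? (String.ofList ((cs.drop i).take (j - i)))).getD 0)).map pvParse := by
  have h := foldl_insertBy_map pvParse
    (fun a b =>
      decide (PySem.Chars.upper a.1 < PySem.Chars.upper b.1) ||
        (!decide (PySem.Chars.upper b.1 < PySem.Chars.upper a.1) &&
          decide ((PySem.Int.ofStr? (String.ofList a.2.1)).getD 0 < (PySem.Int.ofStr? (String.ofList b.2.1)).getD 0)))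
    (fun a b =>
      decide (PySem.Chars.upper (a.toList.take (pvFirstDigit a.toList 0))
              < PySem.Chars.upper (b.toList.take (pvFirstDigit b.toList 0))) ||
        (!decide (PySem.Chars.upper (b.toList.take (pvFirstDigit b.toList 0))
              < PySem.Chars.upper (a.toList.take (pvFirstDigit a.toList 0))) &&
          decide ((PySem.Int.ofStr? (String.ofList ((a.toList.drop (pvFirstDigit a.toList 0)).take
              (pvDigitEnd (a.toList.drop (pvFirstDigit a.toList 0)) (pvFirstDigit a.toList 0)
                - pvFirstDigit a.toList 0)))).getD 0
            < (PySem.Int.ofStr? (String.ofList ((b.toList.drop (pvFirstDigit b.toList 0)).take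
              (pvDigitEnd (b.toList.drop (pvFirstDigit b.toList 0)) (pvFirstDigit b.toList 0)
                - pvFirstDigit b.toList 0)))).getD 0)))
    files []
    (by
      intro x _ y _
      simp only [keyB1_eq, keyB2_eq])
  simpa using h

-- ===== VERDICT (by name: the statement is the Claim_ definition above) =====
theorem solution_spec : Claim_equal_solution := by
  intro files _hdom hpre
  unfold Spec_solution
  have hA : solution files
      = (PySem.List.sorted2 (files.map (fun file => pvLoopA file.toList file.toList 0 [] []))
          (fun x => PySem.Chars.upper x.1)
          (fun x => (PySem.Int.ofStr? (String.ofList x.2.1)).getD 0)).map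
          (fun each => String.ofList (each.1 ++ each.2.1 ++ each.2.2)) := rfl
  have hB : solution_alt files
      = PySem.List.sorted2 files
          (fun f => PySem.Chars.upper (f.toList.take (pvFirstDigit f.toList 0)))
          (fun f =>
            let cs := f.toList
            let i := pvFirstDigit cs 0
            let j := pvDigitEnd (cs.drop i) i
            (PySem.Int.ofStr? (String.ofList ((cs.drop i).take (j - i)))).getD 0) := rfl
  rw [hA, hB]
  rw [List.map_congr_left (fun f hf => pvLoopA_eq_parse f (hpre f hf))]
  rw [sorted2_map_pvParse files, List.map_map]
  conv_rhs => rw [← List.map_id (PySem.List.sorted2 files _ _)]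
  exact List.map_congr_left (fun f _ => by
    simp only [Function.comp, pvParse_join, id]
    exact String.ofList_toList)
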